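-- pv_equiv track=rewrite | github.com/ajmarin/coding | leetcode/02191_sort_the_jumbled_numbers.py | sortJumbled
-- ===== SOURCE A (Python) =====
-- from typing import List
--
-- def sortJumbled(mapping: List[int], nums: List[int]) -> List[int]:
--     def map_num(num: int) -> int:
--         if num < 10:
--             return mapping[num]
--         power, res = 1, 0
--         while num:
--             res += power * mapping[num % 10]
--             num //= 10
--             power *= 10
--         return res
--
--     return sorted(nums, key=map_num)
-- ===== SOURCE B (Python) =====
-- from typing import List
--
-- def sortJumbled(mapping: List[int], nums: List[int]) -> List[int]:
--     # Bucket strategy: compute each number's mapped key (Horner over its decimal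
--     # string), group the numbers by key in a dict (insertion order keeps stability),
--     # sort only the distinct keys, and concatenate the buckets.
--     def map_num(num: int) -> int:
--         if num < 10:
--             return mapping[num]
--         res = 0
--         for c in str(num):
--             res = res * 10 + mapping[ord(c) - 48]
--         return res
--
--     pairs = [(map_num(x), x) for x in nums]
--     groups = {}
--     for k, x in pairs:
--         groups.setdefault(k, []).append(x)
--     out = []
--     for k in sorted(groups):
--         out.extend(groups[k])
--     return out
-- ===== Notes on version B (the rewrite author's own statement) =====
-- stated objective: alternative
-- what changed: B replaces the single sorted(nums, key=map_num) call by a bucket strategy: it precomputes (key, num) pairs, groups the numbers into an insertion-ordered dict keyed by the mapped value (which preserves stability), sorts only the distinct keys, and concatenates the buckets; the key itself is computed Horner-style over str(num) instead of A's %10,//10 loop with a power accumulator.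
import Mathlib
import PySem

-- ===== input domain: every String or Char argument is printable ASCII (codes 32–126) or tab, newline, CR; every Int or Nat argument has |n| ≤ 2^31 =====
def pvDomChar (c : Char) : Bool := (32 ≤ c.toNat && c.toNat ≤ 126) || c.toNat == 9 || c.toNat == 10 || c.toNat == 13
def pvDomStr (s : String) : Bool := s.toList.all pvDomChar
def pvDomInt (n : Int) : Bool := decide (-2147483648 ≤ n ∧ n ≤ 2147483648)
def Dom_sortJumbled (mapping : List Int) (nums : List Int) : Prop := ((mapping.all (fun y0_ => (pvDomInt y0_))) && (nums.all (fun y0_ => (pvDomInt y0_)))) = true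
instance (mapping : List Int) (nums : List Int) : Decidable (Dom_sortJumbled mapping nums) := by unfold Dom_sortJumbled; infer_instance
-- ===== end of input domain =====

-- B sorts by grouping: it buckets the numbers by their mapped key in an insertion-ordered
-- dict, sorts only the distinct keys, and concatenates the buckets (A sorts the whole list
-- with a key function); objective: alternative.


-- ===== PORT A =====
-- A's while loop; it is only reached with num ≥ 10, so we recurse on the Nat value of num
-- (there Python's % and // agree with Nat.mod / Nat.div).  mapping[i] is pyGet?; it is none
-- exactly where Python raises IndexError (excluded by Pre_), the port then uses 0.
def mapLoopA (mapping : List Int) : Nat → Int → Int → Int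
  | 0, _, res => res
  | (n+1), power, res =>
      mapLoopA mapping ((n+1) / 10) (power * 10)
        (res + power * (PySem.List.pyGet? mapping (((n+1) % 10 : Nat) : Int)).getD 0)
  decreasing_by exact Nat.div_lt_self (Nat.succ_pos n) (by norm_num)

def sortJumbled (mapping : List Int) (nums : List Int) : List Int :=
  PySem.List.sorted nums
    (fun num =>
      if num < 10 then (PySem.List.pyGet? mapping num).getD 0
      else mapLoopA mapping num.toNat 1 0)   -- power, res = 1, 0; num ≥ 10 so num.toNat = num

-- ===== PORT B =====
-- B's key: Horner over the characters of str(num); ord(c) is c.toNat.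
def mapNumB (mapping : List Int) (num : Int) : Int :=
  if num < 10 then (PySem.List.pyGet? mapping num).getD 0
  else (PySem.Int.toStr num).toList.foldl
        (fun res c => res * 10 + (PySem.List.pyGet? mapping ((c.toNat : Int) - 48)).getD 0) 0

-- pairs = [(map_num(x), x) …]; groups = dict bucketing (setdefault(k,[]).append(x) is
-- modify k [] (· ++ [x])); then concatenate the buckets of the sorted distinct keys.
def sortJumbled_alt (mapping : List Int) (nums : List Int) : List Int :=
  let pairs := nums.map (fun x => (mapNumB mapping x, x))
  let groups := pairs.foldl (fun d p => d.modify p.1 [] (· ++ [p.2]))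
                  (PySem.Dict.empty : PySem.Dict Int (List Int))
  (PySem.List.sorted groups.keys (fun k => k)).foldl
    (fun out k => out ++ groups.getD k []) []

-- ===== PRECONDITION & SPEC =====
-- Pre_ excludes exactly the inputs where the Python A raises IndexError: a num < 10 used as a
-- (possibly negative) index outside mapping, or a num ≥ 10 with a decimal digit ≥ len(mapping).
def Pre_sortJumbled (mapping : List Int) (nums : List Int) : Prop :=
  ∀ num ∈ nums,
    if num < 10 then -(mapping.length : Int) ≤ num ∧ num < (mapping.length : Int)
    else ∀ d ∈ Nat.digits 10 num.toNat, (d : Int) < (mapping.length : Int)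
instance (mapping : List Int) (nums : List Int) : Decidable (Pre_sortJumbled mapping nums) := by
  unfold Pre_sortJumbled; infer_instance

def pvWitness_sortJumbled : List Int × List Int :=
  ([8, 9, 4, 0, 2, 1, 3, 5, 7, 6], [991, 338, 38])

def Spec_sortJumbled (mapping : List Int) (nums : List Int) (out : List Int) : Prop := out = sortJumbled_alt mapping nums
instance (mapping : List Int) (nums : List Int) (out : List Int) : Decidable (Spec_sortJumbled mapping nums out) := by unfold Spec_sortJumbled; infer_instance

-- ===== CLAIM (what is proved, stated in full; the proofs are below) =====
def Claim_equal_sortJumbled : Prop := ∀ (mapping : List Int) (nums : List Int), Dom_sortJumbled mapping nums → Pre_sortJumbled mapping nums → Spec_sortJumbled mapping nums (sortJumbled mapping nums)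

-- ===== LEMMAS AND PROOFS =====

-- the common value both keys compute, most-significant digit first
def horner (m : List Int) (res : Int) (n : Nat) : Int :=
  if n = 0 then res
  else horner m res (n / 10) * 10 + (PySem.List.pyGet? m ((n % 10 : Nat) : Int)).getD 0
  decreasing_by exact Nat.div_lt_self (Nat.pos_of_ne_zero (by assumption)) (by norm_num)

lemma mapLoopA_eq_horner (m : List Int) :
    ∀ n power res, mapLoopA m n power res = res + power * horner m 0 n := by
  intro n
  induction n using Nat.strong_induction_on with
  | _ n ih =>
    intro power res
    cases n with
    | zero => simp [mapLoopA, horner]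
    | succ k =>
      rw [mapLoopA, ih ((k+1)/10) (Nat.div_lt_self (Nat.succ_pos k) (by norm_num))]
      conv_rhs => rw [horner]
      rw [if_neg (Nat.succ_ne_zero k)]
      ring

lemma digitChar_toNat (d : Nat) (hd : d < 10) :
    ((Nat.digitChar d).toNat : Int) - 48 = (d : Int) := by
  interval_cases d <;> decide

lemma toDigitsCore_foldl (m : List Int) :
    ∀ (f n : Nat) (l : List Char) (res : Int), 0 < n → n ≤ f →
      (Nat.toDigitsCore 10 f n l).foldl
          (fun res c => res * 10 + (PySem.List.pyGet? m ((c.toNat : Int) - 48)).getD 0) res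
        = l.foldl
          (fun res c => res * 10 + (PySem.List.pyGet? m ((c.toNat : Int) - 48)).getD 0)
          (horner m res n) := by
  intro f
  induction f with
  | zero => intro n l res hn hf; omega
  | succ f ih =>
    intro n l res hn hf
    have hstep : Nat.toDigitsCore 10 (f+1) n l
        = if n / 10 = 0 then (n % 10).digitChar :: l
          else Nat.toDigitsCore 10 f (n / 10) ((n % 10).digitChar :: l) := rfl
    have hhorn : horner m res n
        = horner m res (n / 10) * 10 + (PySem.List.pyGet? m ((n % 10 : Nat) : Int)).getD 0 := by
      rw [horner, if_neg (by omega)]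
    rw [hstep]
    by_cases h0 : n / 10 = 0
    · rw [if_pos h0, List.foldl_cons,
        digitChar_toNat (n % 10) (Nat.mod_lt n (by norm_num)), hhorn, h0, horner, if_pos rfl]
    · rw [if_neg h0,
        ih (n / 10) _ _ (Nat.pos_of_ne_zero h0)
          (by have := Nat.div_lt_self hn (show 1 < 10 by norm_num); omega),
        List.foldl_cons, digitChar_toNat (n % 10) (Nat.mod_lt n (by norm_num)), hhorn]

lemma key_eq (m : List Int) (num : Int) :
    (if num < 10 then (PySem.List.pyGet? m num).getD 0 else mapLoopA m num.toNat 1 0)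
      = mapNumB m num := by
  unfold mapNumB
  by_cases h : num < 10
  · simp [h]
  · simp only [h, if_false]
    have hnum : ¬ num < 0 := by omega
    have hpos : 0 < num.toNat := by omega
    rw [PySem.Int.toList_toStr]
    unfold PySem.Int.toChars
    rw [if_neg hnum, Nat.toDigits,
      toDigitsCore_foldl m (num.toNat + 1) num.toNat [] 0 hpos (by omega),
      List.foldl_nil, mapLoopA_eq_horner]
    cases hn : num.toNat with
    | zero => omega
    | succ k => simp

-- the head of dropWhile fails the predicate (spelled on an equation, so it rewrites)
lemma dropWhile_head_false (p : Int → Bool) (h : Int) (rest : List Int) :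
    ∀ l : List Int, List.dropWhile p l = h :: rest → p h = false := by
  intro l
  induction l with
  | nil => intro hd; simp at hd
  | cons a t ih =>
    intro hd
    rw [List.dropWhile_cons] at hd
    by_cases ha : p a
    · exact ih (by simpa [ha] using hd)
    · simp [ha] at hd; rw [← hd.1]; simpa using ha

-- inserting into a key-sorted list appends to its equal-key block: the k-filter gains x at the END
lemma filter_insertBy (key : Int → Int) (k x : Int) :
    ∀ ys : List Int, ys.Pairwise (fun a b => key a ≤ key b) →
      (PySem.List.insertBy (fun a b => decide (key a < key b)) x ys).filter (fun y => key y == k)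
        = ys.filter (fun y => key y == k) ++ (if key x == k then [x] else []) := by
  intro ys
  induction ys with
  | nil => intro _; by_cases hk : key x == k <;> simp [PySem.List.insertBy, hk]
  | cons y ys ih =>
    intro hp
    show (if decide (key x < key y) = true then x :: y :: ys
          else y :: PySem.List.insertBy (fun a b => decide (key a < key b)) x ys).filter
            (fun y => key y == k) = _
    by_cases h : key x < key y
    · rw [if_pos (by simpa using h)]
      by_cases hk : key x == k
      · have hxk : key x = k := by simpa using hk
        have hnil : (y :: ys).filter (fun y => key y == k) = [] := by
          rw [List.filter_eq_nil_iff]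
          intro z hz
          have hyz : key y ≤ key z := by
            rcases List.mem_cons.mp hz with rfl | hz'
            · exact le_refl _
            · exact (List.pairwise_cons.mp hp).1 z hz' 
          simp only [beq_iff_eq]
          omega
        simp [hk, hnil]
      · simp [List.filter_cons, hk]
    · rw [if_neg (by simpa using h)]
      rw [List.filter_cons, List.filter_cons, ih (List.pairwise_cons.mp hp).2]
      by_cases hy : key y == k <;> simp [hy]

-- STABILITY of Python's sort: filtering one key class out of sorted(nums, key) gives
-- exactly that class in original order
lemma sorted_filter_eq (key : Int → Int) (k : Int) (nums : List Int) :
    (PySem.List.sorted nums key).filter (fun y => key y == k)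
      = nums.filter (fun y => key y == k) := by
  induction nums using List.reverseRecOn with
  | nil => rfl
  | append_singleton l x ih =>
    rw [PySem.List.sorted_eq_foldl_insertBy, List.foldl_append, List.foldl_cons, List.foldl_nil,
      ← PySem.List.sorted_eq_foldl_insertBy,
      filter_insertBy key k x _ (PySem.List.sorted_pairwise l key), ih, List.filter_append]
    by_cases hk : key x == k <;> simp [hk]

-- a key-sorted list is the concatenation of its key blocks, taken along any strictly
-- increasing list ks that contains every key occurring in it
lemma blocks_eq (key : Int → Int) :
    ∀ (ks l : List Int), ks.Pairwise (· < ·) →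
      l.Pairwise (fun a b => key a ≤ key b) → (∀ x ∈ l, key x ∈ ks) →
      l = ks.flatMap (fun k => l.filter (fun x => key x == k)) := by
  intro ks
  induction ks with
  | nil =>
    intro l _ _ hmem
    cases l with
    | nil => rfl
    | cons a t => exact absurd (hmem a (List.mem_cons_self)) (by simp)
  | cons k ks ih =>
    intro l hks hl hmem
    have hkslt : ∀ j ∈ ks, k < j := (List.pairwise_cons.mp hks).1
    set p : Int → Bool := fun x => key x == k with hp
    -- every element surviving dropWhile p has key > k
    have hdrop : ∀ x ∈ l.dropWhile p, k < key x := by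
      intro x hx
      have hdp : (l.dropWhile p).Pairwise (fun a b => key a ≤ key b) :=
        hl.sublist (List.dropWhile_sublist p)
      cases hd : l.dropWhile p with
      | nil => rw [hd] at hx; cases hx
      | cons h rest =>
        have hhl : h ∈ l := (List.dropWhile_sublist p).mem (hd ▸ List.mem_cons_self)
        have hph : p h = false := dropWhile_head_false p h rest l hd
        have hhk : key h ≠ k := by simpa [hp] using hph
        have hhin : key h ∈ k :: ks := hmem h hhl
        have hkh : k < key h := by
          rcases List.mem_cons.mp hhin with h' | h'
          · exact absurd h' hhk
          · exact hkslt _ h'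
        rw [hd] at hx
        rcases List.mem_cons.mp hx with rfl | hx
        · exact hkh
        · have : key h ≤ key x := (List.pairwise_cons.mp (hd ▸ hdp)).1 x hx
          omega
    have hsplit : l = l.takeWhile p ++ l.dropWhile p := (List.takeWhile_append_dropWhile).symm
    -- the k-block is exactly the takeWhile prefix
    have hfk : l.filter p = l.takeWhile p := by
      conv_lhs => rw [hsplit]
      rw [List.filter_append, List.filter_eq_self.mpr (fun a ha => List.mem_takeWhile_imp (p := p) (l := l) ha),
        List.filter_eq_nil_iff.mpr (fun a ha => by
          have := hdrop a ha; simp only [hp, beq_iff_eq]; omega)]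
      simp
    -- the other blocks live entirely in the dropWhile suffix
    have hfk' : ∀ k' ∈ ks, l.filter (fun x => key x == k')
        = (l.dropWhile p).filter (fun x => key x == k') := by
      intro k' hk'
      conv_lhs => rw [hsplit]
      rw [List.filter_append, List.filter_eq_nil_iff.mpr (fun a ha => by
        have : p a = true := List.mem_takeWhile_imp ha
        have hak : key a = k := by simpa [hp] using this
        have := hkslt k' hk'
        simp only [beq_iff_eq]; omega)]
      simp
    have hrec : l.dropWhile p
        = ks.flatMap (fun k' => (l.dropWhile p).filter (fun x => key x == k')) := by
      refine ih (l.dropWhile p) (List.pairwise_cons.mp hks).2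
        (hl.sublist (List.dropWhile_sublist p)) ?_
      intro x hx
      have hm : key x ∈ k :: ks := hmem x ((List.dropWhile_sublist p).mem hx)
      rcases List.mem_cons.mp hm with h' | h'
      · exact absurd h' (by have := hdrop x hx; omega)
      · exact h'
    calc l = l.takeWhile p ++ l.dropWhile p := hsplit
      _ = l.filter p ++ ks.flatMap (fun k' => (l.dropWhile p).filter (fun x => key x == k')) := by
          rw [hfk, ← hrec]
      _ = l.filter p ++ ks.flatMap (fun k' => l.filter (fun x => key x == k')) := by
          rw [List.flatMap, List.flatMap, List.map_congr_left (fun k' hk' => (hfk' k' hk').symm)]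
      _ = (k :: ks).flatMap (fun k' => l.filter (fun x => key x == k')) := by
          rw [List.flatMap_cons]

-- ===== VERDICT (by name: the statement is the Claim_ definition above) =====
theorem sortJumbled_spec : Claim_equal_sortJumbled := by
  intro mapping nums _ _
  unfold Spec_sortJumbled sortJumbled sortJumbled_alt
  set key := mapNumB mapping with hkey
  -- A's key function is B's
  have hA : PySem.List.sorted nums
      (fun num => if num < 10 then (PySem.List.pyGet? mapping num).getD 0
                  else mapLoopA mapping num.toNat 1 0)
      = PySem.List.sorted nums key := by
    congr 1; funext num; exact key_eq mapping num
  rw [hA]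
  simp only []
  -- B's buckets: getD groups k [] = nums.filter (key = k)
  have hbucket : ∀ k : Int,
      ((nums.map (fun x => (key x, x))).foldl (fun d p => d.modify p.1 [] (· ++ [p.2]))
        (PySem.Dict.empty : PySem.Dict Int (List Int))).getD k []
      = nums.filter (fun x => key x == k) := by
    intro k
    rw [PySem.Dict.getD_foldl_modify_append, PySem.Dict.getD_empty,
      List.filter_map, List.map_map]
    simp [Function.comp_def]
  -- B's key list: the sorted distinct keys
  have hkeys : ((nums.map (fun x => (key x, x))).foldl (fun d p => d.modify p.1 [] (· ++ [p.2]))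
        (PySem.Dict.empty : PySem.Dict Int (List Int))).keys
      = PySem.Set.ofList (nums.map key) := by
    have h := PySem.Dict.keys_foldl_modify_key (nums.map (fun x => (key x, x)))
      (fun p : Int × Int => p.1) ([] : List Int) (fun _ p v => v ++ [p.2])
      (PySem.Dict.empty : PySem.Dict Int (List Int))
    simp only [] at h
    rw [h, List.map_map]
    simp [PySem.Dict.keys_empty, PySem.Set.update, PySem.Set.ofList_eq_foldl, Function.comp_def]
  rw [hkeys]
  set ks := PySem.List.sorted (PySem.Set.ofList (nums.map key)) (fun k => k) with hks
  rw [PySem.List.foldl_append_eq_flatMap, List.nil_append]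
  have hflat : ks.flatMap (fun k =>
      ((nums.map (fun x => (key x, x))).foldl (fun d p => d.modify p.1 [] (· ++ [p.2]))
        (PySem.Dict.empty : PySem.Dict Int (List Int))).getD k [])
      = ks.flatMap (fun k => nums.filter (fun x => key x == k)) := by
    rw [List.flatMap, List.flatMap, List.map_congr_left (fun k _ => hbucket k)]
  rw [hflat]
  -- A's sorted list decomposes into the same blocks
  have hblocks : PySem.List.sorted nums key
      = ks.flatMap (fun k => (PySem.List.sorted nums key).filter (fun x => key x == k)) := by
    refine blocks_eq key ks (PySem.List.sorted nums key)
      (PySem.List.sorted_ofList_pairwise_lt (nums.map key))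
      (PySem.List.sorted_pairwise nums key) ?_
    intro x hx
    have hxn : x ∈ nums := (PySem.List.mem_sorted _ _ _ _).mp hx
    have : key x ∈ PySem.Set.ofList (nums.map key) :=
      (PySem.Set.mem_ofList _ _).mpr (List.mem_map_of_mem hxn)
    exact (PySem.List.mem_sorted _ _ _ _).mpr this
  rw [hblocks, List.flatMap, List.flatMap,
    List.map_congr_left (fun k _ => sorted_filter_eq key k nums)]
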